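-- pv_equiv track=rewrite | github.com/Amimer12/TP1-SSAD | django_Projet/appTP1/views.py | text_to_tab
-- ===== SOURCE A (Python) =====
-- def text_to_tab(mots, nb_colonnes, nb_lignes):
--      # Construire la matrice
--     tableau = [["" for _ in range(nb_colonnes)] for _ in range(nb_lignes)]
--     index = 0
--     for i in range(nb_lignes):
--         for j in range(nb_colonnes):
--             if index < len(mots):
--                 tableau[i][j] = mots[index]
--                 index += 1
--     return tableau
-- ===== SOURCE B (Python) =====
-- def text_to_tab(mots, nb_colonnes, nb_lignes):
--     # Row-wise slicing instead of a running index cursor with per-cell bounds checks.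
--     flat = list(mots)
--     nc = max(nb_colonnes, 0)
--     return [(flat[i * nc:(i + 1) * nc] + [''] * nc)[:nc] for i in range(nb_lignes)]
-- ===== Notes on version B (the rewrite author's own statement) =====
-- stated objective: simpler
-- what changed: Replaces the pre-built mutable matrix with a running index cursor and per-cell bounds check by a single comprehension that slices the word list row by row and pads each slice to the column count.
import Mathlib
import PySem

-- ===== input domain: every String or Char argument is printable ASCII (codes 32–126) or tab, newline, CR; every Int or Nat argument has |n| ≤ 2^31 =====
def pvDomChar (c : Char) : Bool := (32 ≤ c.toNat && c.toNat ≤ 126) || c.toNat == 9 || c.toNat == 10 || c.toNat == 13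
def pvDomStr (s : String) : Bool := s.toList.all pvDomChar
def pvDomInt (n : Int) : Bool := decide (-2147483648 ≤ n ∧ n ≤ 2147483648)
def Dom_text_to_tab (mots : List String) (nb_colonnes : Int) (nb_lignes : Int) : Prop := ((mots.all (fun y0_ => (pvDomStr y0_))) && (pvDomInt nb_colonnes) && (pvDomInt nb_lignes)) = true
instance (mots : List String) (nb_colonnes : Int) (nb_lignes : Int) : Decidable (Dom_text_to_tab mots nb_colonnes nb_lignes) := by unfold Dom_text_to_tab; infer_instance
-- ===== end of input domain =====

-- B builds each row by slicing the word list and padding it to the column count,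
-- instead of A's pre-built mutable matrix filled through a running index cursor with
-- a per-cell bounds check (A mutates only its local matrix, never its arguments).

-- ===== PORT A =====
def text_to_tab (mots : List String) (nb_colonnes : Int) (nb_lignes : Int) : List (List String) :=
  let tableau : List (List String) :=
    (PySem.List.pyRange 0 nb_lignes 1).map (fun _ =>
      (PySem.List.pyRange 0 nb_colonnes 1).map (fun _ => ""))
  let st :=
    (PySem.List.pyRange 0 nb_lignes 1).foldl (fun (st : List (List String) × Int) i =>
      (PySem.List.pyRange 0 nb_colonnes 1).foldl (fun (st2 : List (List String) × Int) j =>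
        if st2.2 < (mots.length : Int) then
          (PySem.List.pySetD st2.1 i
             (PySem.List.pySetD (PySem.List.pyGetD st2.1 i []) j (PySem.List.pyGetD mots st2.2 "")),
           st2.2 + 1)
        else st2) st) (tableau, 0)
  st.1

-- ===== PORT B =====
def text_to_tab_alt (mots : List String) (nb_colonnes : Int) (nb_lignes : Int) : List (List String) :=
  let flat := mots
  let nc := max nb_colonnes 0
  (PySem.List.pyRange 0 nb_lignes 1).map (fun i =>
    (PySem.List.slice flat (some (i * nc)) (some ((i + 1) * nc)) ++ List.replicate nc.toNat "").take nc.toNat)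

-- ===== PRECONDITION & SPEC =====
def Spec_text_to_tab (mots : List String) (nb_colonnes : Int) (nb_lignes : Int) (out : List (List String)) : Prop := out = text_to_tab_alt mots nb_colonnes nb_lignes
instance (mots : List String) (nb_colonnes : Int) (nb_lignes : Int) (out : List (List String)) : Decidable (Spec_text_to_tab mots nb_colonnes nb_lignes out) := by unfold Spec_text_to_tab; infer_instance

-- ===== CLAIM (what is proved, stated in full; the proofs are below) =====
def Claim_equal_text_to_tab : Prop := ∀ (mots : List String) (nb_colonnes : Int) (nb_lignes : Int), Dom_text_to_tab mots nb_colonnes nb_lignes → Spec_text_to_tab mots nb_colonnes nb_lignes (text_to_tab mots nb_colonnes nb_lignes)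

-- ===== LEMMAS AND PROOFS =====

-- A's inner-loop body at fixed row i, on nat loop counters (what the port's fold
-- becomes once the pyRange / pySetD / pyGetD casts are discharged)
def pvTabInner (mots : List String) (i : Nat) (st : List (List String) × Int) (j : Nat) :
    List (List String) × Int :=
  if st.2 < (mots.length : Int) then
    (st.1.set i ((st.1.getD i []).set j (PySem.List.pyGetD mots st.2 "")), st.2 + 1)
  else st

-- the same loop body acting on the single row it touches
def pvRowStep (mots : List String) (st : List String × Int) (j : Nat) : List String × Int :=
  if st.2 < (mots.length : Int) then
    (st.1.set j (PySem.List.pyGetD mots st.2 ""), st.2 + 1)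
  else st

-- the row A's loops leave at position i (slice of mots padded with "")
def pvRowB (mots : List String) (c i : Nat) : List String :=
  (mots.drop (i * c)).take (min (mots.length - i * c) c) ++
    List.replicate (c - min (mots.length - i * c) c) ""

-- pyRange 0 n 1 as a mapped List.range, for every n (empty on n ≤ 0)
theorem pvPyRangeZero (n : Int) :
    PySem.List.pyRange 0 n 1 = (List.range n.toNat).map (fun k : Nat => (k : Int)) := by
  rcases n with m | m
  · simpa using PySem.List.pyRange_zero_natCast m
  · simp [PySem.List.pyRange]

-- the inner loop only rewrites row i of the matrix
theorem pvInnerSet (mots : List String) (i : Nat) (js : List Nat)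
    (tab : List (List String)) (k : Int) (hi : i < tab.length) :
    js.foldl (pvTabInner mots i) (tab, k) =
      ((tab.set i (js.foldl (pvRowStep mots) (tab.getD i [], k)).1),
       (js.foldl (pvRowStep mots) (tab.getD i [], k)).2) := by
  induction js generalizing tab k with
  | nil =>
      simp only [List.foldl_nil, List.getD, List.getElem?_eq_getElem hi, Option.getD_some,
        List.set_getElem_self]
  | cons j js ih =>
      simp only [List.foldl_cons, pvTabInner, pvRowStep]
      by_cases h : k < (mots.length : Int)
      · simp only [if_pos h]
        rw [ih _ _ (by simpa using hi)]
        simp [List.getElem_set_self, List.set_set, List.length_set, hi]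
      · simp only [if_neg h]
        exact ih _ _ hi

-- closed form of the row loop: fill from position 0 with mots[k:], stop at the end of mots
theorem pvRowClosed (mots : List String) (c : Nat) (r : List String) (k : Nat)
    (hc : c ≤ r.length) :
    (List.range c).foldl (pvRowStep mots) (r, (k : Int)) =
      ((mots.drop k).take (min (mots.length - k) c) ++ r.drop (min (mots.length - k) c),
       ((k + min (mots.length - k) c : Nat) : Int)) := by
  induction c with
  | zero => simp
  | succ c ih =>
      rw [List.range_succ, List.foldl_append]
      rw [ih (by omega)]
      set L := mots.length with hL
      set m := min (L - k) c with hm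
      simp only [List.foldl_cons, List.foldl_nil, pvRowStep]
      by_cases h : k + m < L
      · have hmc : m = c ∧ k + c < L := by omega
        obtain ⟨hmc, hkc⟩ := hmc
        have hpos : ((k + m : Nat) : Int) < (L : Int) := by exact_mod_cast h
        rw [if_pos hpos]
        have hlenA : ((mots.drop k).take c).length = c := by
          simp only [List.length_take, List.length_drop]; omega
        have hcr : c < r.length := by omega
        have hmin : min (L - k) (c + 1) = c + 1 := by omega
        clear_value m
        subst hmc
        rw [hmin]
        simp only [Prod.mk.injEq]
        constructor
        · show ((mots.drop k).take m ++ r.drop m).set m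
              (PySem.List.pyGetD mots ((k + m : Nat) : Int) "") = _
          rw [PySem.List.pyGetD_natCast]
          have := List.set_append_right (s := (mots.drop k).take m) (t := r.drop m)
            m (mots.getD (k + m) "") (by omega)
          rw [this, hlenA, Nat.sub_self]
          rw [List.drop_eq_getElem_cons hcr, List.set_cons_zero]
          rw [List.take_add_one, List.getElem?_drop]
          have hk : k + m < mots.length := hkc
          rw [List.getElem?_eq_getElem hk]
          simp [List.getD, List.getElem?_eq_getElem hk]
        · push_cast; omega
      · have hneg : ¬ ((k + m : Nat) : Int) < (L : Int) := by exact_mod_cast h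
        rw [if_neg hneg]
        have : min (L - k) (c + 1) = m := by omega
        rw [this]

-- closed form of the outer loop: after n rows the first n rows are the slices,
-- the rest of the matrix is untouched, and the cursor is min len(mots) (n*C)
theorem pvOuterClosed (mots : List String) (C N : Nat) (n : Nat) (hn : n ≤ N) :
    (List.range n).foldl
        (fun st i => (List.range C).foldl (pvTabInner mots i) st)
        (List.replicate N (List.replicate C ""), (0 : Int)) =
      ((List.range n).map (pvRowB mots C) ++ List.replicate (N - n) (List.replicate C ""),
       ((min mots.length (n * C) : Nat) : Int)) := by
  induction n with
  | zero => simp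
  | succ n ih =>
      rw [List.range_succ, List.foldl_append, ih (by omega)]
      simp only [List.foldl_cons, List.foldl_nil]
      set L := mots.length with hL
      set k0 := min L (n * C) with hk0
      have hlenmap : ((List.range n).map (pvRowB mots C)).length = n := by simp
      have hlen : ((List.range n).map (pvRowB mots C) ++
          List.replicate (N - n) (List.replicate C "")).length = N := by
        simp; omega
      have hnN : n < N := by omega
      rw [pvInnerSet mots n _ _ _ (by omega)]
      have hgetD : (((List.range n).map (pvRowB mots C) ++
          List.replicate (N - n) (List.replicate C "")).getD n []) = List.replicate C "" := by
        rw [List.getD, List.getElem?_eq_getElem (by omega)]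
        rw [List.getElem_append_right (by omega)]
        simp [hlenmap, List.getElem_replicate]
      rw [hgetD, pvRowClosed mots C _ k0 (by simp)]
      set m := min (L - k0) C with hm
      have hrow : (mots.drop k0).take m ++ (List.replicate C "").drop m = pvRowB mots C n := by
        rw [List.drop_replicate, pvRowB]
        by_cases h : n * C ≤ L
        · have h1 : k0 = n * C := by omega
          have h2 : m = min (L - n * C) C := by omega
          rw [h1, h2]
        · have h1 : m = 0 := by omega
          have h2 : min (L - n * C) C = 0 := by omega
          rw [h1, h2]
          simp
      simp only [Prod.mk.injEq]
      constructor
      · rw [hrow, List.set_append_right _ _ (by omega), hlenmap, Nat.sub_self]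
        have hrep : List.replicate (N - n) (List.replicate C "") =
            List.replicate C "" :: List.replicate (N - (n + 1)) (List.replicate C "") := by
          rw [show N - n = (N - (n + 1)) + 1 by omega, List.replicate_succ]
        rw [hrep, List.set_cons_zero, List.map_append]
        simp
      · have hC : (n + 1) * C = n * C + C := by ring
        have : k0 + m = min L ((n + 1) * C) := by omega
        rw [this]

-- B's padded row slice equals pvRowB
theorem pvRowBEq (mots : List String) (C i : Nat) :
    ((mots.drop (i * C)).take C ++ List.replicate C "").take C = pvRowB mots C i := by
  rw [List.take_append, List.take_take, min_self, List.take_replicate, pvRowB]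
  have hA : (mots.drop (i * C)).take C =
      (mots.drop (i * C)).take (min (mots.length - i * C) C) := by
    by_cases h : mots.length - i * C ≤ C
    · rw [List.take_of_length_le (by simp; omega), List.take_of_length_le (by simp; omega)]
    · rw [min_eq_right (by omega)]
  rw [hA]
  congr 2
  simp only [List.length_take, List.length_drop]
  omega

-- B's slice bounds on nat row indices
theorem pvSliceRow (mots : List String) (C i : Nat) :
    PySem.List.slice mots (some ((i : Int) * (C : Int))) (some (((i : Int) + 1) * (C : Int))) =
      (mots.drop (i * C)).take C := by
  have h1 : (i : Int) * (C : Int) = ((i * C : Nat) : Int) := by push_cast; ring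
  have h2 : ((i : Int) + 1) * (C : Int) = ((i * C : Nat) : Int) + ((C : Nat) : Int) := by
    push_cast; ring
  rw [h1, h2, PySem.List.slice_natCast_add]

theorem pvMainEq (mots : List String) (nb_colonnes nb_lignes : Int) :
    text_to_tab mots nb_colonnes nb_lignes = text_to_tab_alt mots nb_colonnes nb_lignes := by
  unfold text_to_tab text_to_tab_alt
  have hmax : max nb_colonnes 0 = ((nb_colonnes.toNat : Nat) : Int) :=
    (Int.toNat_eq_max nb_colonnes).symm
  rw [hmax, pvPyRangeZero nb_lignes, pvPyRangeZero nb_colonnes]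
  set N := nb_lignes.toNat
  set C := nb_colonnes.toNat
  simp only [List.map_map, Function.comp_def, List.foldl_map, PySem.List.pySetD_natCast,
    PySem.List.pyGetD_natCast, List.map_const', List.length_range,
    pvSliceRow, Int.toNat_natCast]
  refine (congrArg Prod.fst (pvOuterClosed mots C N N le_rfl)).trans ?_
  simp only [Nat.sub_self, List.replicate_zero, List.append_nil]
  exact List.map_congr_left (fun i _ => (pvRowBEq mots C i).symm)

-- ===== VERDICT (by name: the statement is the Claim_ definition above) =====
theorem text_to_tab_spec : Claim_equal_text_to_tab :=
  fun mots nb_colonnes nb_lignes _ => pvMainEq mots nb_colonnes nb_lignes
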